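-- pv_equiv track=rewrite | github.com/maxpetul/C3X | correlator/correlator.py | group_by_name
-- ===== SOURCE A (Python) =====
-- def group_by_name(functions):
--     """Group functions by name, filtering out duplicates"""
--     name_groups = {}
--     for func in functions:
--         name = func["name"]
--         if name not in name_groups:
--             name_groups[name] = []
--         name_groups[name].append(func)
--
--     # Only keep names that have a single function
--     return {name: funcs[0] for name, funcs in name_groups.items() if len(funcs) == 1}
-- ===== SOURCE B (Python) =====
-- def group_by_name(functions):
--     """Single streaming pass: tentatively keep each first occurrence; on a repeat,
--     evict the entry and blacklist the name for the rest of the stream."""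
--     unique = {}
--     dup_names = set()
--     for func in functions:
--         name = func["name"]
--         if name in dup_names:
--             continue
--         if name in unique:
--             del unique[name]
--             dup_names.add(name)
--         else:
--             unique[name] = func
--     return unique
-- ===== Notes on version B (the rewrite author's own statement) =====
-- stated objective: alternative
-- what changed: B replaces A's two-stage group-into-lists-then-filter-by-length by a single streaming pass that tentatively keeps each first occurrence in the result dict and, on seeing a repeated name, deletes that entry and blacklists the name for the rest of the stream; no per-name lists or second pass over groups exist.
import Mathlib
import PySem

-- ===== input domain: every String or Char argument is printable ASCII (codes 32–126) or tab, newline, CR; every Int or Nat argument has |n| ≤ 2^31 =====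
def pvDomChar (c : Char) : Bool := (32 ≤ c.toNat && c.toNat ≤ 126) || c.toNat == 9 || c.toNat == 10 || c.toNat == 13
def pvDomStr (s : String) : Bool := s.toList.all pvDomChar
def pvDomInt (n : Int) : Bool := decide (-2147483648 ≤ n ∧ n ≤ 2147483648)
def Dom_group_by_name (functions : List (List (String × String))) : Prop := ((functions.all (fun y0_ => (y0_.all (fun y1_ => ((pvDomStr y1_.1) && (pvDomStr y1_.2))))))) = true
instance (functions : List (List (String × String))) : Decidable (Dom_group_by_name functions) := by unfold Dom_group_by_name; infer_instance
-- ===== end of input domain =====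

-- B replaces A's group-into-lists-then-filter by a single streaming pass that keeps each first
-- occurrence and, on a repeated name, evicts the entry and blacklists the name (objective: alternative).


-- func["name"]: first-match lookup in the dict (under Pre_ the key is present, so the default is never used)
def pvName (f : List (String × String)) : String := (PySem.Dict.mk f).getD "name" ""

-- ===== PORT A =====
def group_by_name (functions : List (List (String × String))) : List (String × List (String × String)) :=
  let name_groups := functions.foldl (fun d func =>
      let name := pvName func
      let d1 := if d.contains name then d else d.insert name []
      d1.insert name (d1.getD name [] ++ [func]))
    (PySem.Dict.empty : PySem.Dict String (List (List (String × String))))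
  (name_groups.items.foldl (fun r p =>
      if PySem.List.len p.2 == 1 then r.insert p.1 (PySem.List.pyGetD p.2 0 []) else r)
    (PySem.Dict.empty : PySem.Dict String (List (String × String)))).items

-- ===== PORT B =====
-- one step of Source B's loop body over the state (unique, dup_names)
def pvStepB (st : PySem.Dict String (List (String × String)) × PySem.Set String)
    (func : List (String × String)) :
    PySem.Dict String (List (String × String)) × PySem.Set String :=
  let name := pvName func
  if st.2.contains name then st
  else if st.1.contains name then (st.1.erase name, PySem.Set.add st.2 name)
  else (st.1.insert name func, st.2)

def group_by_name_alt (functions : List (List (String × String))) :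
    List (String × List (String × String)) :=
  (functions.foldl pvStepB
    ((PySem.Dict.empty : PySem.Dict String (List (String × String))),
     (PySem.Set.empty : PySem.Set String))).1.items

-- ===== PRECONDITION & SPEC =====
-- Pre_ excludes exactly the inputs on which Python A raises KeyError: a function dict without a "name" key.
def Pre_group_by_name (functions : List (List (String × String))) : Prop :=
  ∀ f ∈ functions, (PySem.Dict.mk f).contains "name" = true
instance (functions : List (List (String × String))) : Decidable (Pre_group_by_name functions) := by
  unfold Pre_group_by_name; infer_instance

def pvWitness_group_by_name : (List (List (String × String))) := [[("name", "a"), ("args", "x")], [("name", "b")]]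

def Spec_group_by_name (functions : List (List (String × String))) (out : List (String × List (String × String))) : Prop := out = group_by_name_alt functions
instance (functions : List (List (String × String))) (out : List (String × List (String × String))) : Decidable (Spec_group_by_name functions out) := by unfold Spec_group_by_name; infer_instance

-- ===== CLAIM (what is proved, stated in full; the proofs are below) =====
def Claim_equal_group_by_name : Prop := ∀ (functions : List (List (String × String))), Dom_group_by_name functions → Pre_group_by_name functions → Spec_group_by_name functions (group_by_name functions)

-- ===== LEMMAS AND PROOFS =====

theorem pvBeqCast (n : Nat) : ((n : Int) == 1) = (n == 1) := by
  by_cases h : n = 1 <;> simp [h]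

-- first-occurrence dedup (PySem.Set.ofList) is a sublist of its source
theorem pvOfListAux {α : Type} [BEq α] (xs s : List α) :
    List.Sublist (List.foldl PySem.Set.add s xs) (s ++ xs) := by
  induction xs generalizing s with
  | nil => simp
  | cons x xs ih =>
    simp only [List.foldl_cons]
    refine (ih (PySem.Set.add s x)).trans ?_
    unfold PySem.Set.add
    split
    · exact List.Sublist.append_left (List.sublist_cons_self x xs) s
    · simp [List.append_assoc]

theorem pvOfListSublist {α : Type} [BEq α] (xs : List α) :
    List.Sublist (PySem.Set.ofList xs) xs :=
  pvOfListAux xs []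

-- on the count-1 elements, dedup order and original order coincide
theorem pvFilterDedup {α : Type} [DecidableEq α] (xs : List α) :
    (PySem.Set.ofList xs).filter (fun k => xs.count k == 1)
      = xs.filter (fun k => xs.count k == 1) := by
  have h1 := (pvOfListSublist xs).filter (fun k => xs.count k == 1)
  have h2 : ((PySem.Set.ofList xs).filter (fun k => xs.count k == 1)).Nodup :=
    (PySem.Set.nodup_ofList xs).filter _
  have h3 : (xs.filter (fun k => xs.count k == 1)).Nodup := by
    rw [List.nodup_iff_count_le_one]
    intro a
    by_cases h : xs.count a = 1
    · rw [List.count_filter (by simp [h])]; omega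
    · have ha : a ∉ xs.filter (fun k => xs.count k == 1) := by
        simp [List.mem_filter, h]
      simp [List.count_eq_zero_of_not_mem ha]
  have h4 : ((PySem.Set.ofList xs).filter (fun k => xs.count k == 1)).Perm
      (xs.filter (fun k => xs.count k == 1)) := by
    rw [List.perm_ext_iff_of_nodup h2 h3]
    intro a
    simp [List.mem_filter, PySem.Set.mem_ofList]
  exact h1.eq_of_length h4.length_eq

theorem pvCountLen (functions : List (List (String × String))) (k : String) :
    (functions.map pvName).count k = (functions.filter (fun f => pvName f == k)).length := by
  rw [List.count_eq_countP, ← List.countP_eq_length_filter, List.countP_map]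
  rfl

theorem pvSingleton (functions : List (List (String × String))) (f : List (String × String))
    (hf : f ∈ functions) (h1 : (functions.map pvName).count (pvName f) = 1) :
    functions.filter (fun g => pvName g == pvName f) = [f] := by
  have hlen : (functions.filter (fun g => pvName g == pvName f)).length = 1 := by
    rw [← pvCountLen]; exact h1
  have hmem : f ∈ functions.filter (fun g => pvName g == pvName f) :=
    List.mem_filter.2 ⟨hf, by simp⟩
  obtain ⟨a, ha⟩ := List.length_eq_one_iff.1 hlen
  rw [ha] at hmem ⊢
  simp at hmem
  rw [hmem]

-- A's "ensure key exists, then append" step is dict.modify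
theorem pvStepA (d : PySem.Dict String (List (List (String × String)))) (k : String) (f : List (String × String)) :
    (let d1 := if d.contains k then d else d.insert k []
     d1.insert k (d1.getD k [] ++ [f])) = d.modify k [] (· ++ [f]) := by
  by_cases h : d.contains k = true
  · simp [h, PySem.Dict.modify]
  · simp [h, PySem.Dict.modify, PySem.Dict.insert_insert_self, PySem.Dict.getD_of_not_contains]

theorem pvLenBeq (p : String × List (List (String × String))) :
    (PySem.List.len p.2 == (1 : Int)) = (p.2.length == 1) := by
  rw [PySem.List.len_eq]; exact pvBeqCast _

theorem pvA_char (functions : List (List (String × String))) :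
    group_by_name functions
      = ((PySem.Set.ofList (functions.map pvName)).filter
          (fun k => (functions.filter (fun f => pvName f == k)).length == 1)).map
        (fun k => (k, PySem.List.pyGetD (functions.filter (fun f => pvName f == k)) 0 [])) := by
  unfold group_by_name
  have hgroups : functions.foldl (fun d func =>
      let name := pvName func
      let d1 := if d.contains name then d else d.insert name []
      d1.insert name (d1.getD name [] ++ [func]))
      (PySem.Dict.empty : PySem.Dict String (List (List (String × String))))
      = (functions.map (fun f => (pvName f, f))).foldl
          (fun d p => d.modify p.1 [] (· ++ [p.2])) PySem.Dict.empty := by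
    rw [List.foldl_map]
    congr 1
    funext d f
    exact pvStepA d (pvName f) f
  simp only [hgroups]
  set pairs := functions.map (fun f => (pvName f, f)) with hpairs
  set G := pairs.foldl (fun d p => d.modify p.1 [] (· ++ [p.2])) PySem.Dict.empty with hG
  have hnd : G.keys.Nodup := PySem.Dict.nodup_keys_foldl_modify_key _ _ _ _ _ (by simp)
  have hkeys : G.keys = PySem.Set.ofList (functions.map pvName) := by
    rw [hG, PySem.Dict.keys_foldl_modify_key]
    have : pairs.map Prod.fst = functions.map pvName := by
      rw [hpairs, List.map_map]; rfl
    rw [this]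
    rfl
  have hgetD : ∀ k, G.getD k [] = functions.filter (fun f => pvName f == k) := by
    intro k
    rw [hG, PySem.Dict.getD_foldl_modify_append]
    rw [hpairs, List.filter_map, List.map_map]
    simp [Function.comp_def]
  have hitems : G.items = (PySem.Set.ofList (functions.map pvName)).map
      (fun k => (k, functions.filter (fun f => pvName f == k))) := by
    rw [PySem.Dict.items_eq_map_keys _ hnd [], hkeys]
    exact List.map_congr_left (fun k _ => by rw [hgetD])
  rw [hitems]
  simp only [pvLenBeq]
  rw [← List.foldl_filter, List.filter_map]
  have hnd2 : (((PySem.Set.ofList (functions.map pvName)).filter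
        ((fun p => p.2.length == 1) ∘ (fun k => (k, functions.filter (fun f => pvName f == k))))).map
        (fun k => (k, functions.filter (fun f => pvName f == k))) |>.map Prod.fst).Nodup := by
    rw [List.map_map]
    have : (Prod.fst ∘ fun k => (k, functions.filter (fun f => pvName f == k))) = id := rfl
    rw [this, List.map_id]
    exact (PySem.Set.nodup_ofList _).filter _
  rw [PySem.Dict.items_foldl_insert_fresh _ Prod.fst (fun p => PySem.List.pyGetD p.2 0 []) _
    (by intro a _; simp) hnd2]
  simp [PySem.Dict.empty, List.map_map, Function.comp_def]

-- ===== B's loop invariant =====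

-- the entries B's dict holds after processing prefix p: first occurrences of names appearing once in p
def pvL (p : List (List (String × String))) : List (String × List (String × String)) :=
  (p.filter (fun f => (p.map pvName).count (pvName f) == 1)).map (fun f => (pvName f, f))

theorem pvCnt_app (p : List (List (String × String))) (f : List (String × String)) (k : String) :
    ((p ++ [f]).map pvName).count k
      = (p.map pvName).count k + (if pvName f = k then 1 else 0) := by
  simp [List.count_append, List.count_cons]

theorem pvMem_cnt_pos (p : List (List (String × String))) (g : List (String × String))
    (hg : g ∈ p) : 1 ≤ (p.map pvName).count (pvName g) := by
  have : pvName g ∈ p.map pvName := List.mem_map.2 ⟨g, hg, rfl⟩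
  exact List.count_pos_iff.2 this

theorem pvL_app_dup (p : List (List (String × String))) (f : List (String × String))
    (h : 2 ≤ (p.map pvName).count (pvName f)) : pvL (p ++ [f]) = pvL p := by
  unfold pvL
  rw [List.filter_append]
  have hf : List.filter (fun g => ((p ++ [f]).map pvName).count (pvName g) == 1) [f] = [] := by
    simp only [List.filter_cons, List.filter_nil]
    rw [pvCnt_app]
    have : ((p.map pvName).count (pvName f) + 1 == 1) = false := by
      simp; omega
    simp [this]
  rw [hf, List.append_nil]
  congr 1
  apply List.filter_congr
  intro g hg
  rw [pvCnt_app]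
  by_cases he : pvName f = pvName g
  · rw [if_pos he]
    rw [← he]
    have h1 : ((p.map pvName).count (pvName f) + 1 == 1) = false := by simp; omega
    have h2 : ((p.map pvName).count (pvName f) == 1) = false := by simp; omega
    rw [h1, h2]
  · rw [if_neg he, Nat.add_zero]

theorem pvL_app_fresh (p : List (List (String × String))) (f : List (String × String))
    (h : (p.map pvName).count (pvName f) = 0) :
    pvL (p ++ [f]) = pvL p ++ [(pvName f, f)] := by
  unfold pvL
  rw [List.filter_append]
  have hf : List.filter (fun g => ((p ++ [f]).map pvName).count (pvName g) == 1) [f] = [f] := by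
    simp only [List.filter_cons, List.filter_nil]
    rw [pvCnt_app]
    simp [h]
  rw [hf, List.map_append]
  congr 2
  apply List.filter_congr
  intro g hg
  rw [pvCnt_app]
  have hne : pvName f ≠ pvName g := by
    intro he
    have := pvMem_cnt_pos p g hg
    rw [← he, h] at this
    omega
  rw [if_neg hne, Nat.add_zero]

theorem pvL_app_second (p : List (List (String × String))) (f : List (String × String))
    (h : (p.map pvName).count (pvName f) = 1) :
    pvL (p ++ [f]) = (pvL p).filter (fun q => !(q.1 == pvName f)) := by
  unfold pvL
  rw [List.filter_append]
  have hf : List.filter (fun g => ((p ++ [f]).map pvName).count (pvName g) == 1) [f] = [] := by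
    simp only [List.filter_cons, List.filter_nil]
    rw [pvCnt_app]
    simp [h]
  rw [hf, List.append_nil]
  rw [List.filter_map]
  have : (List.filter (fun g => ((p ++ [f]).map pvName).count (pvName g) == 1) p)
      = (p.filter (fun g => (p.map pvName).count (pvName g) == 1)).filter
          (fun g => !(pvName g == pvName f)) := by
    rw [List.filter_filter]
    apply List.filter_congr
    intro g hg
    rw [pvCnt_app]
    by_cases he : pvName f = pvName g
    · rw [if_pos he, ← he, h]
      simp
    · rw [if_neg he, Nat.add_zero]
      have : (pvName g == pvName f) = false := by
        simp
        exact fun hx => he hx.symm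
      simp [this]
  rw [this]
  rfl

-- B's "name in unique" test reads exactly "name appears once in the prefix"
theorem pvContainsL (p : List (List (String × String))) (n : String) :
    (PySem.Dict.mk (pvL p)).contains n = decide ((p.map pvName).count n = 1) := by
  by_cases h : (p.map pvName).count n = 1
  · simp only [h, decide_true]
    have hn : n ∈ p.map pvName := List.count_pos_iff.1 (by omega)
    obtain ⟨g, hg, hgn⟩ := List.mem_map.1 hn
    simp only [PySem.Dict.contains, pvL, List.any_eq_true]
    exact ⟨(n, g), List.mem_map.2 ⟨g, List.mem_filter.2 ⟨hg, by simp [hgn, h]⟩, by rw [hgn]⟩, by simp⟩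
  · simp only [h, decide_false]
    simp only [PySem.Dict.contains, pvL, List.any_eq_false]
    rintro ⟨k, v⟩ hkv
    obtain ⟨g, hg, hgeq⟩ := List.mem_map.1 hkv
    obtain ⟨-, hc⟩ := List.mem_filter.1 hg
    intro hbeq
    apply h
    have hk : k = pvName g := by cases hgeq; rfl
    have hn : n = pvName g := by
      have : k = n := by simpa using hbeq
      rw [← this, hk]
    rw [hn]
    simpa using hc

theorem pvB_loop (s p : List (List (String × String))) (dups : PySem.Set String)
    (hd : ∀ k, dups.contains k = decide (2 ≤ (p.map pvName).count k)) :
    (s.foldl pvStepB (PySem.Dict.mk (pvL p), dups)).1.items = pvL (p ++ s) := by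
  induction s generalizing p dups with
  | nil => simp
  | cons f s ih =>
    rw [List.foldl_cons]
    have hassoc : p ++ f :: s = (p ++ [f]) ++ s := by simp
    rw [hassoc]
    by_cases h2 : 2 ≤ (p.map pvName).count (pvName f)
    · -- already a known duplicate: skip
      have hct : dups.contains (pvName f) = true := by
        rw [hd (pvName f)]; exact decide_eq_true h2
      have hstep : pvStepB (PySem.Dict.mk (pvL p), dups) f = (PySem.Dict.mk (pvL p), dups) := by
        unfold pvStepB
        simp only [hct, if_true]
      rw [hstep]
      have hLeq : PySem.Dict.mk (pvL p) = PySem.Dict.mk (pvL (p ++ [f])) := by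
        rw [pvL_app_dup p f h2]
      rw [hLeq]
      apply ih
      intro k
      rw [hd k, pvCnt_app, decide_eq_decide]
      by_cases he : pvName f = k
      · rw [if_pos he, ← he]
        omega
      · rw [if_neg he, Nat.add_zero]
    · by_cases h1 : (p.map pvName).count (pvName f) = 1
      · -- second occurrence: evict and blacklist
        have hnd : dups.contains (pvName f) = false := by
          rw [hd (pvName f)]; simp; omega
        have hstep : pvStepB (PySem.Dict.mk (pvL p), dups) f
            = (PySem.Dict.mk (pvL (p ++ [f])), PySem.Set.add dups (pvName f)) := by
          unfold pvStepB
          simp only [hnd, Bool.false_eq_true, if_false, pvContainsL, h1, decide_true, if_true]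
          rw [pvL_app_second p f h1]
          rfl
        rw [hstep]
        apply ih
        intro k
        have hadd : PySem.Set.add dups (pvName f) = dups ++ [pvName f] := by
          unfold PySem.Set.add
          rw [hnd]
          simp
        rw [hadd, pvCnt_app]
        by_cases he : pvName f = k
        · subst he
          rw [if_pos rfl, h1]
          simp [PySem.Set.contains]
        · rw [if_neg he, Nat.add_zero]
          have hck : (PySem.Set.contains (dups ++ [pvName f]) k) = dups.contains k := by
            simp only [PySem.Set.contains, List.contains_append]
            have : [pvName f].contains k = false := by
              simp
              exact fun hx => he hx.symm
            rw [this, Bool.or_false]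
          rw [hck, hd k]
      · -- first occurrence: tentatively keep
        have h0 : (p.map pvName).count (pvName f) = 0 := by omega
        have hnd : dups.contains (pvName f) = false := by
          rw [hd (pvName f)]; simp; omega
        have hstep : pvStepB (PySem.Dict.mk (pvL p), dups) f
            = (PySem.Dict.mk (pvL (p ++ [f])), dups) := by
          unfold pvStepB
          simp only [hnd, Bool.false_eq_true, if_false, pvContainsL, h1, decide_false, if_false]
          have hins : (PySem.Dict.mk (pvL p)).insert (pvName f) f
              = PySem.Dict.mk (pvL (p ++ [f])) := by
            apply PySem.Dict.ext
            rw [PySem.Dict.items_insert_of_not_contains _ _ (by rw [pvContainsL]; simp [h1])]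
            rw [pvL_app_fresh p f h0]
          rw [hins]
        rw [hstep]
        apply ih
        intro k
        rw [hd k, pvCnt_app]
        by_cases he : pvName f = k
        · rw [if_pos he, ← he, h0]
          rfl
        · rw [if_neg he, Nat.add_zero]

theorem pvB_char (functions : List (List (String × String))) :
    group_by_name_alt functions
      = (functions.filter (fun f => (functions.map pvName).count (pvName f) == 1)).map
          (fun f => (pvName f, f)) := by
  unfold group_by_name_alt
  have hstart : ((PySem.Dict.empty : PySem.Dict String (List (String × String))),
      (PySem.Set.empty : PySem.Set String)) = (PySem.Dict.mk (pvL []), ([] : PySem.Set String)) := by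
    rfl
  rw [hstart, pvB_loop functions [] [] (by intro k; simp [PySem.Set.contains])]
  rfl

-- ===== VERDICT (by name: the statement is the Claim_ definition above) =====
theorem group_by_name_spec : Claim_equal_group_by_name := by
  intro functions _ _
  unfold Spec_group_by_name
  rw [pvA_char, pvB_char]
  have h1 : (fun k => (List.filter (fun f => pvName f == k) functions).length == 1)
      = (fun k => (functions.map pvName).count k == 1) := by
    funext k; rw [pvCountLen]
  rw [h1, pvFilterDedup]
  have h2 : (functions.map pvName).filter (fun k => (functions.map pvName).count k == 1)
      = (functions.filter (fun f => (functions.map pvName).count (pvName f) == 1)).map pvName := by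
    rw [List.filter_map]; rfl
  rw [h2, List.map_map]
  refine List.map_congr_left ?_
  intro f hf
  have hf1 : f ∈ functions := (List.mem_filter.1 hf).1
  have hc1 : (functions.map pvName).count (pvName f) = 1 := by
    simpa using (List.mem_filter.1 hf).2
  have hs := pvSingleton functions f hf1 hc1
  simp [hs, PySem.List.pyGetD_zero_cons]
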